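-- pv_equiv track=rewrite | github.com/simon3198/recommender-system | main.py | extract_non_numeric_substring
-- ===== SOURCE A (Python) =====
-- def extract_non_numeric_substring(input_string):
--     result = ""
--     found_non_numeric = False
--
--     for char in input_string:
--         if not char.isdigit():
--             found_non_numeric = True
--             result += char
--         elif found_non_numeric:
--             break
--
--     return result
-- ===== SOURCE B (Python) =====
-- def extract_non_numeric_substring(input_string):
--     n = len(input_string)
--     i = 0
--     while i < n and input_string[i].isdigit():
--         i += 1
--     j = i
--     while j < n and not input_string[j].isdigit():
--         j += 1
--     return input_string[i:j]
-- ===== Notes on version B (the rewrite author's own statement) =====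
-- stated objective: alternative
-- what changed: Replaces the flag-driven accumulating loop with two index scans (end of leading digit run, end of following non-digit run) and a single slice; no mutable flag and no string concatenation.
import Mathlib
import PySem

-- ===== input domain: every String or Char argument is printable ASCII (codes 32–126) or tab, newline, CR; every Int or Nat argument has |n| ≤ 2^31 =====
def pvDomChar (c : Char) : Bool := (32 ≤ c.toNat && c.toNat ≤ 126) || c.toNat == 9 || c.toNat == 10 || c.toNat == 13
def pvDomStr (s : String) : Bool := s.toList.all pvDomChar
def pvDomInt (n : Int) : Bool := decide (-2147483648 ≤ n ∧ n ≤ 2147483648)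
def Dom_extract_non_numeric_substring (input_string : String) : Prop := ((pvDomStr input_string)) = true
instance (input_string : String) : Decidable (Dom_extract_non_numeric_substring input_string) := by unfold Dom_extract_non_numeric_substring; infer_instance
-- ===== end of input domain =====

-- B replaces A's flag-driven accumulating loop with two index scans and one slice (alternative decomposition, same behaviour).


-- ===== PORT A =====
-- the for-loop over the characters with accumulator `result` and flag `found_non_numeric`; `break` = return res
def aLoop : List Char → List Char → Bool → List Char
  | [], res, _ => res
  | c :: cs, res, found =>
    if !(PySem.Chars.isdigit c) then aLoop cs (res ++ [c]) true
    else if found then res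
    else aLoop cs res found

def extract_non_numeric_substring (input_string : String) : String :=
  String.ofList (aLoop input_string.toList [] false)

-- ===== PORT B =====
-- first while loop: while i < n and input_string[i].isdigit(): i += 1
def bScan1 (cs : List Char) (i : Nat) : Nat :=
  if h : i < cs.length then
    if PySem.Chars.isdigit cs[i] then bScan1 cs (i + 1) else i
  else i
termination_by cs.length - i

-- second while loop: while j < n and not input_string[j].isdigit(): j += 1
def bScan2 (cs : List Char) (j : Nat) : Nat :=
  if h : j < cs.length then
    if !(PySem.Chars.isdigit cs[j]) then bScan2 cs (j + 1) else j
  else j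
termination_by cs.length - j

def extract_non_numeric_substring_alt (input_string : String) : String :=
  let cs := input_string.toList
  let i := bScan1 cs 0
  let j := bScan2 cs i
  String.ofList (PySem.List.slice cs (some (i : Int)) (some (j : Int)))

-- ===== PRECONDITION & SPEC =====
def Spec_extract_non_numeric_substring (input_string : String) (out : String) : Prop := out = extract_non_numeric_substring_alt input_string
instance (input_string : String) (out : String) : Decidable (Spec_extract_non_numeric_substring input_string out) := by unfold Spec_extract_non_numeric_substring; infer_instance

-- ===== CLAIM (what is proved, stated in full; the proofs are below) =====
def Claim_equal_extract_non_numeric_substring : Prop := ∀ (input_string : String), Dom_extract_non_numeric_substring input_string → Spec_extract_non_numeric_substring input_string (extract_non_numeric_substring input_string)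

-- ===== LEMMAS AND PROOFS =====

-- A's loop once the flag is set collects the non-digit prefix
theorem aLoop_true (cs res : List Char) :
    aLoop cs res true = res ++ cs.takeWhile (fun c => !(PySem.Chars.isdigit c)) := by
  induction cs generalizing res with
  | nil => simp [aLoop]
  | cons c cs ih =>
    by_cases h : PySem.Chars.isdigit c
    · simp [aLoop, h]
    · simp [aLoop, h, ih]

-- A's loop with the flag unset skips the leading digits, then collects
theorem aLoop_false (cs res : List Char) :
    aLoop cs res false =
      res ++ (cs.dropWhile PySem.Chars.isdigit).takeWhile (fun c => !(PySem.Chars.isdigit c)) := by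
  induction cs generalizing res with
  | nil => simp [aLoop]
  | cons c cs ih =>
    by_cases h : PySem.Chars.isdigit c
    · simp [aLoop, h, ih]
    · simp [aLoop, h, aLoop_true]

-- B's first scan ends at i + length of the digit run starting at i
theorem bScan1_spec (cs : List Char) (i : Nat) :
    bScan1 cs i = i + ((cs.drop i).takeWhile PySem.Chars.isdigit).length := by
  fun_induction bScan1 cs i with
  | case1 i h hd ih =>
    rw [ih, List.drop_eq_getElem_cons h, List.takeWhile_cons, hd]
    simp; omega
  | case2 i h hd =>
    rw [List.drop_eq_getElem_cons h, List.takeWhile_cons]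
    simp [hd]
  | case3 i h =>
    simp [List.drop_eq_nil_of_le (by omega : cs.length ≤ i)]

-- B's second scan ends at j + length of the non-digit run starting at j
theorem bScan2_spec (cs : List Char) (j : Nat) :
    bScan2 cs j = j + ((cs.drop j).takeWhile (fun c => !(PySem.Chars.isdigit c))).length := by
  fun_induction bScan2 cs j with
  | case1 j h hd ih =>
    rw [ih, List.drop_eq_getElem_cons h, List.takeWhile_cons, hd]
    simp; omega
  | case2 j h hd =>
    rw [List.drop_eq_getElem_cons h, List.takeWhile_cons]
    simp at hd
    simp [hd]
  | case3 j h =>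
    simp [List.drop_eq_nil_of_le (by omega : cs.length ≤ j)]

theorem drop_takeWhile_length (p : Char → Bool) (cs : List Char) :
    cs.drop (cs.takeWhile p).length = cs.dropWhile p := by
  induction cs with
  | nil => simp
  | cons c cs ih =>
    by_cases h : p c <;> simp [h, ih]

theorem take_takeWhile_length (p : Char → Bool) (cs : List Char) :
    cs.take (cs.takeWhile p).length = cs.takeWhile p := by
  induction cs with
  | nil => simp
  | cons c cs ih =>
    by_cases h : p c <;> simp [h, ih]

-- ===== VERDICT (by name: the statement is the Claim_ definition above) =====
theorem extract_non_numeric_substring_spec : Claim_equal_extract_non_numeric_substring := by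
  intro s _
  unfold Spec_extract_non_numeric_substring
  simp only [extract_non_numeric_substring, extract_non_numeric_substring_alt]
  rw [aLoop_false, bScan1_spec, bScan2_spec, PySem.List.slice_natCast]
  simp only [List.drop_zero, List.nil_append, Nat.zero_add, Nat.add_sub_cancel_left,
    drop_takeWhile_length, take_takeWhile_length]
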